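-- pv_equiv track=rewrite | github.com/coder-saab001/MLPractical | Exp6-CollaborativeFiltering/main.py | common_items
-- ===== SOURCE A (Python) =====
-- def common_items(user1_data, user2_data):
--     result = []
--     ht = {}
--     for (movie_id, rating) in user1_data.items():
--         ht.setdefault(movie_id, 0)
--         ht[movie_id] += 1
--     for (movie_id, rating) in user2_data.items():
--         ht.setdefault(movie_id, 0)
--         ht[movie_id] += 1
--     for (k, v) in ht.items():
--         if v == 2:
--             result.append(k)
--     return result
-- ===== SOURCE B (Python) =====
-- def common_items(user1_data, user2_data):
--     # Single membership-filtering pass over user1's keys; no count table.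
--     return [k for k in user1_data if k in user2_data]
-- ===== Notes on version B (the rewrite author's own statement) =====
-- stated objective: simpler
-- what changed: A builds a count table over both dicts' keys in two loops and then a third loop filters keys counted twice; B is a single pass over user1's keys appending those that are also keys of user2, maintaining no table.
import Mathlib
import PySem

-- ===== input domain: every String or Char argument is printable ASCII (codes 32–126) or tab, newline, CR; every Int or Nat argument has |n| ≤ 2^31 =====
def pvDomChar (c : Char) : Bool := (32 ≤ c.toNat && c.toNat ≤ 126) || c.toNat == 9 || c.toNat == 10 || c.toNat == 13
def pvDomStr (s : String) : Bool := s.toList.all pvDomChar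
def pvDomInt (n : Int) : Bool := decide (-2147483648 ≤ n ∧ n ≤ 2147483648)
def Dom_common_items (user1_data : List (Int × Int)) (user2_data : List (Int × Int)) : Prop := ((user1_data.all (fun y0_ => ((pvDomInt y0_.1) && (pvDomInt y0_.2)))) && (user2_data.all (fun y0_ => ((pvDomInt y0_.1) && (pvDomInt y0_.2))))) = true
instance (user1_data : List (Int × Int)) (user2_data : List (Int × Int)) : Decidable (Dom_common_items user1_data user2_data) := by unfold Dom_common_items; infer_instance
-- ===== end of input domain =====

-- B replaces A's three loops (count keys of both dicts in a table, then filter counts == 2)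
-- by a single membership-filtering pass over user1's keys; objective: simpler.

-- ===== PORT A =====
def common_items (user1_data : List (Int × Int)) (user2_data : List (Int × Int)) : List Int :=
  let ht : PySem.Dict Int Int :=
    user1_data.foldl (fun ht p => (ht.setdefault p.1 0).modify p.1 0 (· + 1)) PySem.Dict.empty
  let ht := user2_data.foldl (fun ht p => (ht.setdefault p.1 0).modify p.1 0 (· + 1)) ht
  ht.items.foldl (fun result p => if p.2 == 2 then result ++ [p.1] else result) []

-- ===== PORT B =====
def common_items_alt (user1_data : List (Int × Int)) (user2_data : List (Int × Int)) : List Int :=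
  (user1_data.map (·.1)).filter (fun k => (PySem.Dict.mk user2_data).contains k)

-- ===== PRECONDITION & SPEC =====
-- The parameters are Python dicts, whose keys are necessarily distinct; Pre_ states
-- exactly that dict invariant on the association-list representation (it excludes no
-- dict input A accepts).
def Pre_common_items (user1_data : List (Int × Int)) (user2_data : List (Int × Int)) : Prop :=
  (user1_data.map (·.1)).Nodup ∧ (user2_data.map (·.1)).Nodup
instance (user1_data : List (Int × Int)) (user2_data : List (Int × Int)) : Decidable (Pre_common_items user1_data user2_data) := by unfold Pre_common_items; infer_instance

def pvWitness_common_items : (List (Int × Int)) × (List (Int × Int)) :=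
  ([(1, 5), (2, 3), (4, 1)], [(2, 4), (3, 1)])

def Spec_common_items (user1_data : List (Int × Int)) (user2_data : List (Int × Int)) (out : List Int) : Prop := out = common_items_alt user1_data user2_data
instance (user1_data : List (Int × Int)) (user2_data : List (Int × Int)) (out : List Int) : Decidable (Spec_common_items user1_data user2_data out) := by unfold Spec_common_items; infer_instance

-- ===== CLAIM (what is proved, stated in full; the proofs are below) =====
def Claim_equal_common_items : Prop := ∀ (user1_data : List (Int × Int)) (user2_data : List (Int × Int)), Dom_common_items user1_data user2_data → Pre_common_items user1_data user2_data → Spec_common_items user1_data user2_data (common_items user1_data user2_data)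

-- ===== LEMMAS AND PROOFS =====

-- A's 'setdefault k 0 then ht[k] += 1' is one counting modify.
theorem step_eq (d : PySem.Dict Int Int) (k : Int) :
    (d.setdefault k 0).modify k 0 (· + 1) = d.modify k 0 (· + 1) := by
  cases h : d.contains k
  · rw [PySem.Dict.setdefault_of_not_contains d 0 h]
    simp [PySem.Dict.modify, PySem.Dict.getD_insert_self, PySem.Dict.insert_insert_self,
      PySem.Dict.getD_of_not_contains d 0 h]
  · rw [PySem.Dict.setdefault_of_contains d 0 h]

-- A's two counting loops build Counter(keys(u1) ++ keys(u2)).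
theorem ht_eq (u1 u2 : List (Int × Int)) :
    u2.foldl (fun ht p => (ht.setdefault p.1 0).modify p.1 0 (· + 1))
      (u1.foldl (fun ht p => (ht.setdefault p.1 0).modify p.1 0 (· + 1)) PySem.Dict.empty)
    = PySem.Dict.counter (u1.map (·.1) ++ u2.map (·.1)) := by
  have hf : (fun (ht : PySem.Dict Int Int) (p : Int × Int) => (ht.setdefault p.1 0).modify p.1 0 (· + 1))
      = fun ht p => ht.modify p.1 0 (· + 1) := by
    funext ht p; exact step_eq ht p.1
  rw [hf, PySem.Dict.counter_eq_foldl, List.foldl_append]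
  simp only [List.foldl_map]

theorem main_eq (u1 u2 : List (Int × Int))
    (h1 : (u1.map (·.1)).Nodup) (h2 : (u2.map (·.1)).Nodup) :
    common_items u1 u2 = common_items_alt u1 u2 := by
  unfold common_items
  simp only []
  rw [ht_eq, PySem.List.foldl_append_if, PySem.Dict.items_counter, List.filter_map,
    PySem.Set.ofList_append, PySem.Set.ofList_eq_self_of_nodup _ h1,
    PySem.Set.update_eq_append_filter, PySem.Set.ofList_eq_self_of_nodup _ h2,
    List.filter_append, List.map_append, List.map_append, List.filter_filter]
  -- keys first seen in user2 are counted at most once, so the 'count == 2' filter drops them all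
  have hnil : ((u2.map (·.1)).filter fun a =>
      ((fun p => p.2 == 2) ∘ fun k => (k, ((u1.map (·.1) ++ u2.map (·.1)).count k : Int))) a
        && !(PySem.Set.contains (u1.map (·.1)) a)) = [] := by
    rw [List.filter_eq_nil_iff]
    intro x hx
    simp only [Function.comp, Bool.and_eq_true, Bool.not_eq_true',
      PySem.Set.contains_eq_listContains, List.contains_eq_mem, decide_eq_false_iff_not, not_and]
    intro hc hm
    rw [List.count_append] at hc
    have c1 : (u1.map (·.1)).count x = 0 := by rw [List.count_eq_zero]; exact hm
    have c2 : (u2.map (·.1)).count x ≤ 1 := by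
      rw [List.nodup_iff_count_le_one] at h2; exact h2 x
    have : ((u1.map (·.1)).count x : Int) + ((u2.map (·.1)).count x : Int) ≠ 2 := by
      rw [c1]; push_cast; omega
    rw [Nat.cast_add, beq_iff_eq] at hc
    exact this hc
  rw [hnil]
  -- on user1's keys, 'count == 2' is exactly membership in user2
  have hcg : ((u1.map (·.1)).filter fun a =>
      ((fun p => p.2 == 2) ∘ fun k => (k, ((u1.map (·.1) ++ u2.map (·.1)).count k : Int))) a)
      = (u1.map (·.1)).filter (fun k => (PySem.Dict.mk u2).contains k) := by
    apply List.filter_congr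
    intro x hx
    simp only [Function.comp]
    rw [PySem.Dict.contains_eq_decide_mem_keys]
    have hkeys : (PySem.Dict.mk u2).keys = u2.map (·.1) := rfl
    rw [hkeys, List.count_append]
    have c1 : (u1.map (·.1)).count x = 1 := List.count_eq_one_of_mem h1 hx
    by_cases hm : x ∈ u2.map (·.1)
    · have c2 : (u2.map (·.1)).count x = 1 := List.count_eq_one_of_mem h2 hm
      simp only [hm, decide_true, c1, c2]
      decide
    · have c2 : (u2.map (·.1)).count x = 0 := by rwa [List.count_eq_zero]
      simp only [hm, decide_false, c1, c2]
      decide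
  rw [hcg]
  simp only [common_items_alt]
  simp [Function.comp_def]

-- ===== VERDICT (by name: the statement is the Claim_ definition above) =====
theorem common_items_spec : Claim_equal_common_items := by
  intro u1 u2 _ hpre
  exact main_eq u1 u2 hpre.1 hpre.2
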